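-- pv_equiv track=rewrite | github.com/brzozasr/codecool_series | utils.py | pagination_len
-- ===== SOURCE A (Python) =====
-- import math
--
-- def pagination_len(no_of_records: int, current_page_no: int, limit: int, visible_pagination=5) -> dict:
--     """Shows only part of pagination. The length of pagination depends on param "visible_pagination".
--     :param no_of_records: number of records received from DB,
--     :param current_page_no: current page number,
--     :param limit: limit of showed records in DB,
--     :param visible_pagination: length visible pagination (e.g. for value 5, << 2 3 4 5 6 >>).
--     :return: fixed length dictionary with the pages and with length sets by "visible_pagination"
--     {1: 0, 2: 15...}, key = no of page, value = offset."""
--     pages = dict()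
--     all_pages_no = math.ceil(no_of_records / limit)
--     middle_page = math.ceil(visible_pagination / 2)
--
--     if visible_pagination >= all_pages_no:
--         offset = 0
--         for page in range(1, all_pages_no + 1):
--             pages[page] = offset
--             offset += limit
--         return pages
--     elif visible_pagination < all_pages_no:
--         if current_page_no >= middle_page and current_page_no <= ((all_pages_no - visible_pagination) + middle_page):
--             offset = limit * (current_page_no - middle_page)
--             for page in range((current_page_no - middle_page) + 1,
--                               (current_page_no - middle_page) + visible_pagination + 1):
--                 pages[page] = offset
--                 offset += limit
--             return pages
--         elif current_page_no < middle_page: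
--             offset = 0
--             for page in range(1, visible_pagination + 1):
--                 pages[page] = offset
--                 offset += limit
--             return pages
--         elif current_page_no > ((all_pages_no - visible_pagination) + middle_page):
--             offset = limit * (all_pages_no - visible_pagination)
--             for page in range((all_pages_no - visible_pagination) + 1, all_pages_no + 1):
--                 pages[page] = offset
--                 offset += limit
--             return pages
-- ===== SOURCE B (Python) =====
-- import math
--
-- def pagination_len(no_of_records: int, current_page_no: int, limit: int, visible_pagination=5) -> dict:
--     """Same pagination window, computed as one clamped [start, end] range:
--     every page's offset is limit * (page - 1)."""
--     all_pages_no = math.ceil(no_of_records / limit)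
--     middle = math.ceil(visible_pagination / 2)
--     if visible_pagination >= all_pages_no:
--         start, end = 1, all_pages_no
--     else:
--         start = max(1, min(current_page_no - middle + 1, all_pages_no - visible_pagination + 1))
--         end = start + visible_pagination - 1
--     return {page: limit * (page - 1) for page in range(start, end + 1)}
-- ===== Notes on version B (the rewrite author's own statement) =====
-- stated objective: simpler
-- what changed: Replaces the four-way branch, each with its own dict-building loop and running offset accumulator, by one clamped [start,end] window computation plus a single comprehension using the closed form offset = limit*(page-1).
import Mathlib
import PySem

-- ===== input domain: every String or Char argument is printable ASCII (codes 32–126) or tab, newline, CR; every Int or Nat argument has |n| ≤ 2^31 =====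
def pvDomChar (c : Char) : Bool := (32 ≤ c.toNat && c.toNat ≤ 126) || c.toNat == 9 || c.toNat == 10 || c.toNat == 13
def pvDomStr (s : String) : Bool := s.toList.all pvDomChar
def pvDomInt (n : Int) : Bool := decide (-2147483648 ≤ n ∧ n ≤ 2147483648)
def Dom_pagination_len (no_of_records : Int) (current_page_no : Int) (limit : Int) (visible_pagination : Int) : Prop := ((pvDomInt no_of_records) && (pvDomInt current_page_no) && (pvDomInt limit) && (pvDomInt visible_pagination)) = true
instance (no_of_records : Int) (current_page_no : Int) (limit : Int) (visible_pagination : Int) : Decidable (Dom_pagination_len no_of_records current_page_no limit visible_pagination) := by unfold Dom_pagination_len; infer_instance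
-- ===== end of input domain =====

-- B computes the pagination window as one clamped [start,end] range with the closed-form
-- offset limit*(page-1), replacing A's four conditional dict-building loops (objective: simpler).

-- math.ceil(a / b) for ints a, b: equals -((-a) // b). Exact on Dom (|a|,|b| ≤ 2^31, b ≠ 0):
-- the float quotient is within half an ulp of a/b, which is less than the 1/|b| ≥ 2^-31 gap
-- to the nearest other integer, so float ceil agrees with the exact integer ceiling.
def pyCeilDiv (a b : Int) : Int := -(PySem.Int.floordiv (-a) b)

-- ===== PORT A =====
-- one of A's four identical 'pages[page] = offset; offset += limit' loops, state = (pages, offset)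
def pagesLoop (limit : Int) (lo hi : Int) (st : PySem.Dict Int Int × Int) : PySem.Dict Int Int × Int :=
  (PySem.List.pyRange lo hi 1).foldl (fun st page => (st.1.insert page st.2, st.2 + limit)) st

def pagination_len (no_of_records : Int) (current_page_no : Int) (limit : Int) (visible_pagination : Int) : List (Int × Int) :=
  let all_pages_no := pyCeilDiv no_of_records limit
  let middle_page := pyCeilDiv visible_pagination 2
  if visible_pagination ≥ all_pages_no then
    (pagesLoop limit 1 (all_pages_no + 1) (PySem.Dict.empty, 0)).1.items
  else -- 'elif visible_pagination < all_pages_no' is exactly the complement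
    if current_page_no ≥ middle_page ∧ current_page_no ≤ (all_pages_no - visible_pagination) + middle_page then
      (pagesLoop limit ((current_page_no - middle_page) + 1) ((current_page_no - middle_page) + visible_pagination + 1)
        (PySem.Dict.empty, limit * (current_page_no - middle_page))).1.items
    else if current_page_no < middle_page then
      (pagesLoop limit 1 (visible_pagination + 1) (PySem.Dict.empty, 0)).1.items
    else -- 'elif current_page_no > (all_pages_no - visible_pagination) + middle_page' is the complement of the two guards above
      (pagesLoop limit ((all_pages_no - visible_pagination) + 1) (all_pages_no + 1)
        (PySem.Dict.empty, limit * (all_pages_no - visible_pagination))).1.items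

-- ===== PORT B =====
def pagination_len_alt (no_of_records : Int) (current_page_no : Int) (limit : Int) (visible_pagination : Int) : List (Int × Int) :=
  let all_pages_no := pyCeilDiv no_of_records limit
  let middle := pyCeilDiv visible_pagination 2
  let (start, stop) :=
    if visible_pagination ≥ all_pages_no then (1, all_pages_no)
    else
      let s := max 1 (min (current_page_no - middle + 1) (all_pages_no - visible_pagination + 1))
      (s, s + visible_pagination - 1)
  (PySem.List.pyRange start (stop + 1) 1).map (fun page => (page, limit * (page - 1)))

-- ===== PRECONDITION & SPEC =====
-- A (and B) raise ZeroDivisionError when limit = 0; nothing else raises.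
def Pre_pagination_len (no_of_records : Int) (current_page_no : Int) (limit : Int) (visible_pagination : Int) : Prop :=
  limit ≠ 0
instance (no_of_records : Int) (current_page_no : Int) (limit : Int) (visible_pagination : Int) : Decidable (Pre_pagination_len no_of_records current_page_no limit visible_pagination) := by unfold Pre_pagination_len; infer_instance
def pvWitness_pagination_len : Int × Int × Int × Int := (100, 3, 10, 5)

def Spec_pagination_len (no_of_records : Int) (current_page_no : Int) (limit : Int) (visible_pagination : Int) (out : List (Int × Int)) : Prop := out = pagination_len_alt no_of_records current_page_no limit visible_pagination
instance (no_of_records : Int) (current_page_no : Int) (limit : Int) (visible_pagination : Int) (out : List (Int × Int)) : Decidable (Spec_pagination_len no_of_records current_page_no limit visible_pagination out) := by unfold Spec_pagination_len; infer_instance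

-- ===== CLAIM (what is proved, stated in full; the proofs are below) =====
def Claim_equal_pagination_len : Prop := ∀ (no_of_records : Int) (current_page_no : Int) (limit : Int) (visible_pagination : Int), Dom_pagination_len no_of_records current_page_no limit visible_pagination → Pre_pagination_len no_of_records current_page_no limit visible_pagination → Spec_pagination_len no_of_records current_page_no limit visible_pagination (pagination_len no_of_records current_page_no limit visible_pagination)

-- ===== LEMMAS AND PROOFS =====

-- A's loop, started on a dict whose keys are all < lo, appends exactly the pairs
-- (page, off + limit*(page - lo)) for page in range(lo, hi).
theorem pagesLoop_items (limit : Int) : ∀ n : Nat, ∀ lo hi : Int, (hi - lo).toNat = n →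
    ∀ (d : PySem.Dict Int Int) (off : Int), (∀ k ∈ d.keys, k < lo) →
    (pagesLoop limit lo hi (d, off)).1.items
      = d.items ++ (PySem.List.pyRange lo hi 1).map (fun page => (page, off + limit * (page - lo))) := by
  intro n
  induction n with
  | zero =>
    intro lo hi hn d off _
    have hle : hi ≤ lo := by omega
    simp [pagesLoop, PySem.List.pyRange_one_eq_nil hle]
  | succ m ih =>
    intro lo hi hn d off hkeys
    have hlt : lo < hi := by omega
    rw [pagesLoop, PySem.List.pyRange_one_cons hlt]
    simp only [List.foldl_cons, List.map_cons]
    have hnotmem : lo ∉ d.keys := fun h => absurd (hkeys lo h) (lt_irrefl lo)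
    have hcont : d.contains lo = false := by
      rw [PySem.Dict.contains_eq_decide_mem_keys]; simp [hnotmem]
    have hrec := ih (lo+1) hi (by omega) (d.insert lo off) (off + limit) (by
      intro k hk
      rcases (PySem.Dict.mem_keys_insert d lo k off).mp hk with h | h
      · omega
      · have := hkeys k h; omega)
    rw [show (PySem.List.pyRange (lo+1) hi 1).foldl (fun st page => (st.1.insert page st.2, st.2 + limit)) (d.insert lo off, off + limit) = pagesLoop limit (lo+1) hi (d.insert lo off, off + limit) from rfl]
    rw [hrec, PySem.Dict.items_insert_of_not_contains d off hcont]
    simp only [List.append_assoc, List.cons_append, List.nil_append]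
    congr 2
    · ring_nf
    · apply List.map_congr_left
      intro p _
      simp only [Prod.mk.injEq, true_and]
      ring

-- loop result from the empty dict, with starting offset limit*(lo-1): the closed form
theorem pagesLoop_closed (limit lo hi : Int) :
    (pagesLoop limit lo hi (PySem.Dict.empty, limit * (lo - 1))).1.items
      = (PySem.List.pyRange lo hi 1).map (fun page => (page, limit * (page - 1))) := by
  rw [pagesLoop_items limit (hi - lo).toNat lo hi rfl PySem.Dict.empty (limit * (lo - 1)) (by simp [PySem.Dict.keys_empty])]
  rw [show (PySem.Dict.empty : PySem.Dict Int Int).items = [] from rfl, List.nil_append]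
  apply List.map_congr_left
  intro p _
  simp only [Prod.mk.injEq, true_and]
  ring

-- ===== VERDICT (by name: the statement is the Claim_ definition above) =====
theorem pagination_len_spec : Claim_equal_pagination_len := by
  intro nr cpn limit vp _ _
  unfold Spec_pagination_len pagination_len pagination_len_alt
  set A := pyCeilDiv nr limit with hA
  set M := pyCeilDiv vp 2 with hM
  by_cases h1 : vp ≥ A
  · simp only [if_pos h1]
    have := pagesLoop_closed limit 1 (A + 1)
    simpa using this
  · simp only [if_neg h1]
    by_cases h2 : cpn ≥ M ∧ cpn ≤ (A - vp) + M
    · simp only [if_pos h2]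
      have hs : max 1 (min (cpn - M + 1) (A - vp + 1)) = cpn - M + 1 := by omega
      rw [hs]
      have := pagesLoop_closed limit ((cpn - M) + 1) ((cpn - M) + vp + 1)
      rw [show limit * (cpn - M) = limit * (((cpn - M) + 1) - 1) by ring] 
      rw [this]
      congr 2
      omega
    · simp only [if_neg h2]
      by_cases h3 : cpn < M
      · simp only [if_pos h3]
        have hs : max 1 (min (cpn - M + 1) (A - vp + 1)) = 1 := by omega
        rw [hs]
        have := pagesLoop_closed limit 1 (vp + 1)
        simpa using this
      · simp only [if_neg h3]
        have hs : max 1 (min (cpn - M + 1) (A - vp + 1)) = (A - vp) + 1 := by omega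
        rw [hs]
        have := pagesLoop_closed limit ((A - vp) + 1) (A + 1)
        rw [show limit * (A - vp) = limit * (((A - vp) + 1) - 1) by ring]
        rw [this]
        congr 2
        omega
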